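-- pv_equiv track=rewrite | github.com/Rafey16504/GrowPak-Whatsapp | stt-finetune/Inference/urdu_inference.py | merge_transcripts
-- ===== SOURCE A (Python) =====
-- def merge_transcripts(prev, curr, max_overlap_words=25):
--     """
--     Removes duplicated overlap between two consecutive chunk transcripts
--     """
--     prev_words = prev.split()
--     curr_words = curr.split()
--
--     max_check = min(len(prev_words), len(curr_words), max_overlap_words)
--
--     for i in range(max_check, 0, -1):
--         if prev_words[-i:] == curr_words[:i]:
--             return prev + " " + " ".join(curr_words[i:])
--
--     return prev + " " + curr
-- ===== SOURCE B (Python) =====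
-- def merge_transcripts(prev, curr, max_overlap_words=25):
--     """
--     Removes duplicated overlap between two consecutive chunk transcripts.
--     KMP prefix-function on curr_words + [sentinel] + prev_words: the border
--     chain of the whole token list enumerates every overlap length in
--     decreasing order, so one linear pass replaces A's repeated slice checks.
--     """
--     prev_words = prev.split()
--     curr_words = curr.split()
--     tokens = curr_words + [None] + prev_words  # None can equal no word
--     n = len(tokens)
--     pi = [0]
--     for i in range(1, n):
--         k = pi[i - 1]
--         while k > 0 and tokens[i] != tokens[k]:
--             k = pi[k - 1]
--         if tokens[i] == tokens[k]:
--             k += 1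
--         pi.append(k)
--     l = pi[n - 1]
--     while l > 0 and l > max_overlap_words:
--         l = pi[l - 1]
--     if l > 0:
--         return prev + " " + " ".join(curr_words[l:])
--     return prev + " " + curr
-- ===== Notes on version B (the rewrite author's own statement) =====
-- stated objective: alternative
-- what changed: Replaces A's descending scan that compares prev_words[-i:] to curr_words[:i] for every candidate i (worst-case quadratic in the overlap window) by one KMP prefix-function pass over curr_words + [sentinel] + prev_words followed by a walk down the border chain to the longest overlap not exceeding max_overlap_words (worst-case linear).
import Mathlib
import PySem

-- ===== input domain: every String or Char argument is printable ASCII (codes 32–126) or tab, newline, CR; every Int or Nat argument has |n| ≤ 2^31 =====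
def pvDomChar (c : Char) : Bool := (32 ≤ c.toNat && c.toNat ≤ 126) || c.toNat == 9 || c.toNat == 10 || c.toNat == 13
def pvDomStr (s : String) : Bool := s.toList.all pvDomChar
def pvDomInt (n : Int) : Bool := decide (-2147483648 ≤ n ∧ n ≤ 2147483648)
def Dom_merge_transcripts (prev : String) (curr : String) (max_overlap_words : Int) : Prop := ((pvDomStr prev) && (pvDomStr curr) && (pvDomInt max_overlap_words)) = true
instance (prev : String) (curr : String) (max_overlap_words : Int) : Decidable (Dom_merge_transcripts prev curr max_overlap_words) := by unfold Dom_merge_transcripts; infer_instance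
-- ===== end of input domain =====

-- B replaces A's descending scan of repeated slice comparisons by one KMP prefix-function
-- pass over curr_words ++ [sentinel] ++ prev_words followed by a walk down the border chain
-- (objective: alternative algorithm); return values proved equal on all inputs.

-- Python str concatenation 'a + b' (exact: code-point append)
def pyCat (a b : String) : String := String.ofList (a.toList ++ b.toList)

-- ===== PORT A =====
-- the 'for i in range(max_check, 0, -1)' loop with its early return
def mtLoopA (prev curr : String) (pw cw : List String) : List Int → String
  | [] => pyCat (pyCat prev " ") curr
  | i :: rest =>
      if PySem.List.slice pw (some (-i)) none = PySem.List.slice cw none (some i) then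
        pyCat (pyCat prev " ") (PySem.Str.join " " (PySem.List.slice cw (some i) none))
      else mtLoopA prev curr pw cw rest

def merge_transcripts (prev : String) (curr : String) (max_overlap_words : Int) : String :=
  let prev_words := PySem.Str.split₀ prev
  let curr_words := PySem.Str.split₀ curr
  let max_check : Int := min (min (prev_words.length : Int) (curr_words.length : Int)) max_overlap_words
  mtLoopA prev curr prev_words curr_words (PySem.List.pyRange max_check 0 (-1))

-- ===== PORT B =====
-- 'while k > 0 and <cond k>: k = pi[k-1]' — shared shape of Source B's two while loops
def borderWalk (pi : List Nat) (cond : Nat → Bool) : Nat → Nat → Nat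
  | 0, k => k
  | fuel+1, k => if 0 < k ∧ cond k then borderWalk pi cond fuel (pi.getD (k-1) 0) else k

-- body of 'for i in range(1, n)' in Source B
def kmpStep (t : List (Option String)) (pi : List Nat) (i : Nat) : List Nat :=
  let k0 := pi.getD (i-1) 0
  let k1 := borderWalk pi (fun k => t.getD i none != t.getD k none) (k0+1) k0
  let k2 := if t.getD i none = t.getD k1 none then k1 + 1 else k1
  pi ++ [k2]

def kmpPi (t : List (Option String)) : List Nat :=
  (List.range' 1 (t.length - 1)).foldl (kmpStep t) [0]

def merge_transcripts_alt (prev : String) (curr : String) (max_overlap_words : Int) : String :=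
  let prev_words := PySem.Str.split₀ prev
  let curr_words := PySem.Str.split₀ curr
  let tokens : List (Option String) := curr_words.map some ++ none :: prev_words.map some
  let pi := kmpPi tokens
  let l0 := pi.getD (tokens.length - 1) 0
  let l := borderWalk pi (fun l => decide (max_overlap_words < (l : Int))) (l0+1) l0
  if 0 < l then
    pyCat (pyCat prev " ") (PySem.Str.join " " (PySem.List.slice curr_words (some (l : Int)) none))
  else pyCat (pyCat prev " ") curr

-- ===== PRECONDITION & SPEC =====
def Spec_merge_transcripts (prev : String) (curr : String) (max_overlap_words : Int) (out : String) : Prop := out = merge_transcripts_alt prev curr max_overlap_words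
instance (prev : String) (curr : String) (max_overlap_words : Int) (out : String) : Decidable (Spec_merge_transcripts prev curr max_overlap_words out) := by unfold Spec_merge_transcripts; infer_instance

-- ===== CLAIM (what is proved, stated in full; the proofs are below) =====
def Claim_equal_merge_transcripts : Prop := ∀ (prev : String) (curr : String) (max_overlap_words : Int), Dom_merge_transcripts prev curr max_overlap_words → Spec_merge_transcripts prev curr max_overlap_words (merge_transcripts prev curr max_overlap_words)

-- ===== LEMMAS AND PROOFS =====

-- 'Bp t m l': l is a proper border of the length-m prefix of t
abbrev Bp (t : List (Option String)) (m l : Nat) : Prop :=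
  l < m ∧ t.take l = (t.take m).drop (m - l)

-- longest proper border of the length-m prefix
def bl (t : List (Option String)) (m : Nat) : Nat :=
  Nat.findGreatest (fun l => Bp t m l) (m-1)

lemma bp_zero (t : List (Option String)) {m : Nat} (hm : 0 < m) : Bp t m 0 := by
  refine ⟨hm, ?_⟩
  simp

lemma bp_bl (t : List (Option String)) {m : Nat} (hm : 0 < m) : Bp t m (bl t m) := by
  exact Nat.findGreatest_spec (Nat.zero_le _) (bp_zero t hm)

lemma le_bl {t : List (Option String)} {m l : Nat} (h : Bp t m l) : l ≤ bl t m := by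
  exact Nat.le_findGreatest (by have := h.1; omega) h

lemma bp_compose {t : List (Option String)} {a b m : Nat}
    (h1 : Bp t b a) (h2 : Bp t m b) : Bp t m a := by
  obtain ⟨hab, e1⟩ := h1
  obtain ⟨hbm, e2⟩ := h2
  refine ⟨by omega, ?_⟩
  rw [e1, e2, List.drop_drop]
  congr 1
  omega

lemma bp_desc {t : List (Option String)} {l b m : Nat}
    (h1 : Bp t m l) (h2 : Bp t m b) (hlb : l < b) : Bp t b l := by
  obtain ⟨hlm, e1⟩ := h1
  obtain ⟨hbm, e2⟩ := h2
  refine ⟨hlb, ?_⟩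
  rw [e2, List.drop_drop, e1]
  congr 1
  omega

lemma bp_succ_iff {t : List (Option String)} {m l : Nat}
    (hmn : m < t.length) (hl : 1 ≤ l) :
    Bp t (m+1) l ↔ Bp t m (l-1) ∧ t.getD (l-1) none = t.getD m none := by
  obtain ⟨j, rfl⟩ : ∃ j, l = j + 1 := ⟨l - 1, by omega⟩
  simp only [Nat.add_sub_cancel]
  constructor
  · rintro ⟨hlt, heq⟩
    have hjm : j < m := by omega
    have hjn : j < t.length := by omega
    rw [List.take_add_one, List.take_add_one,
        show m + 1 - (j + 1) = m - j by omega, List.drop_append,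
        show m - j - (t.take m).length = 0 by simp; omega, List.drop_zero] at heq
    have hlen : (t.take j).length = ((t.take m).drop (m - j)).length := by
      simp; omega
    obtain ⟨e1, e2⟩ := List.append_inj heq (by simpa using hlen)
    refine ⟨⟨hjm, e1⟩, ?_⟩
    rw [List.getElem?_eq_getElem hjn, List.getElem?_eq_getElem hmn] at e2
    simp only [Option.toList_some] at e2
    rw [List.getD_eq_getElem t none hjn, List.getD_eq_getElem t none hmn]
    simpa using e2
  · rintro ⟨⟨hjm, e1⟩, e2⟩
    have hjn : j < t.length := by omega
    refine ⟨by omega, ?_⟩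
    rw [List.take_add_one, List.take_add_one,
        show m + 1 - (j + 1) = m - j by omega, List.drop_append,
        show m - j - (t.take m).length = 0 by simp; omega, List.drop_zero, e1]
    congr 1
    rw [List.getElem?_eq_getElem hjn, List.getElem?_eq_getElem hmn]
    rw [List.getD_eq_getElem t none hjn, List.getD_eq_getElem t none hmn] at e2
    simp [e2]

lemma borderWalk_spec (t : List (Option String)) (pi : List Nat) (cond : Nat → Bool)
    {m : Nat}
    (hpi : ∀ k, 1 ≤ k → k < m → pi.getD (k-1) 0 = bl t k) :
    ∀ fuel k, k < fuel → Bp t m k → (∀ l, Bp t m l → k < l → cond l = true) →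
      Bp t m (borderWalk pi cond fuel k) ∧
      (cond (borderWalk pi cond fuel k) = false ∨ borderWalk pi cond fuel k = 0) ∧
      (∀ l, Bp t m l → borderWalk pi cond fuel k < l → cond l = true) := by
  intro fuel
  induction fuel with
  | zero => intro k hk; omega
  | succ fuel ih =>
    intro k hk hB habove
    rw [borderWalk]
    by_cases hc : 0 < k ∧ cond k = true
    · rw [if_pos hc]
      have hk1 : 1 ≤ k := hc.1
      have hkm : k < m := hB.1
      have hgd : pi.getD (k-1) 0 = bl t k := hpi k hk1 hkm
      have hblk : Bp t k (bl t k) := bp_bl t hk1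
      have hB' : Bp t m (bl t k) := bp_compose hblk hB
      have hlt : bl t k < k := hblk.1
      refine ih (pi.getD (k-1) 0) (by omega) (by rw [hgd]; exact hB') ?_
      intro l hBl hgt
      rw [hgd] at hgt
      rcases lt_trichotomy l k with h | h | h
      · exact absurd (le_bl (bp_desc hBl hB h)) (by omega)
      · subst h; exact hc.2
      · exact habove l hBl h
    · rw [if_neg hc]
      refine ⟨hB, ?_, habove⟩
      by_cases h0 : k = 0
      · exact Or.inr h0
      · left
        by_cases hcc : cond k = true
        · exact absurd ⟨by omega, hcc⟩ hc
        · simpa using hcc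

lemma kmpStep_bl {t : List (Option String)} {pi : List Nat} {i : Nat}
    (h1 : 1 ≤ i) (h2 : i < t.length)
    (hpi : ∀ j, j < i → pi.getD j 0 = bl t (j+1)) :
    kmpStep t pi i = pi ++ [bl t (i+1)] := by
  have hk0 : pi.getD (i-1) 0 = bl t i := by
    have := hpi (i-1) (by omega)
    rwa [show i-1+1 = i by omega] at this
  have hpi' : ∀ k, 1 ≤ k → k < i → pi.getD (k-1) 0 = bl t k := by
    intro k hk1 hki
    have := hpi (k-1) (by omega)
    rwa [show k-1+1 = k by omega] at this
  set cond := fun k => t.getD i none != t.getD k none with hcond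
  have hstart : Bp t i (pi.getD (i-1) 0) := by rw [hk0]; exact bp_bl t h1
  have habove : ∀ l, Bp t i l → pi.getD (i-1) 0 < l → cond l = true := by
    intro l hBl hgt
    rw [hk0] at hgt
    exact absurd (le_bl hBl) (by omega)
  obtain ⟨hBw, hw2, hw3⟩ := borderWalk_spec t pi cond hpi'
    (pi.getD (i-1) 0 + 1) (pi.getD (i-1) 0) (by omega) hstart habove
  set w := borderWalk pi cond (pi.getD (i-1) 0 + 1) (pi.getD (i-1) 0) with hw
  have hrfl : kmpStep t pi i = pi ++ [if t.getD i none = t.getD w none then w + 1 else w] := rfl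
  rw [hrfl]
  congr 1
  split_ifs with heq
  · -- match: w+1 is the longest border of prefix i+1
    have hborder : Bp t (i+1) (w+1) := by
      refine (bp_succ_iff h2 (by omega)).mpr ?_
      simpa using ⟨hBw, heq.symm⟩
    have hle1 : w + 1 ≤ bl t (i+1) := le_bl hborder
    have hle2 : bl t (i+1) ≤ w + 1 := by
      have hbB : Bp t (i+1) (bl t (i+1)) := bp_bl t (by omega)
      by_cases hb0 : bl t (i+1) = 0
      · omega
      · obtain ⟨hb', he⟩ := (bp_succ_iff h2 (by omega)).mp hbB
        by_contra hgt
        have hcnd := hw3 _ hb' (by omega)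
        rw [hcond] at hcnd
        simp only [bne_iff_ne, ne_eq] at hcnd
        exact hcnd he.symm
    simp [le_antisymm hle2 hle1]
  · -- mismatch: w = 0 and the longest border of prefix i+1 is 0
    have hw0 : w = 0 := by
      rcases hw2 with hcf | h0
      · rw [hcond] at hcf
        simp only [bne_eq_false_iff_eq] at hcf
        exact absurd hcf heq
      · exact h0
    have : bl t (i+1) = 0 := by
      by_contra hb0
      have hbB : Bp t (i+1) (bl t (i+1)) := bp_bl t (by omega)
      obtain ⟨hb', he⟩ := (bp_succ_iff h2 (by omega)).mp hbB
      by_cases hbw : bl t (i+1) - 1 = 0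
      · rw [hbw] at he
        rw [hw0] at heq
        exact heq he.symm
      · have hcnd := hw3 _ hb' (by omega)
        rw [hcond] at hcnd
        simp only [bne_iff_ne, ne_eq] at hcnd
        exact hcnd he.symm
    simp [this, hw0]

lemma kmpPi_fold (t : List (Option String)) (ht : 0 < t.length) :
    ∀ c, c ≤ t.length - 1 →
      ((List.range' 1 c).foldl (kmpStep t) [0]).length = c + 1 ∧
      ∀ j, j ≤ c → ((List.range' 1 c).foldl (kmpStep t) [0]).getD j 0 = bl t (j+1) := by
  intro c
  induction c with
  | zero =>
    intro _
    refine ⟨by simp, ?_⟩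
    intro j hj
    interval_cases j
    simp [bl, Nat.findGreatest_zero]
  | succ c ih =>
    intro hc
    obtain ⟨ihl, ihg⟩ := ih (by omega)
    rw [List.range'_1_concat, List.foldl_concat]
    rw [kmpStep_bl (by omega) (by omega) (fun j hj => ihg j (by omega))]
    constructor
    · simp [ihl]
    · intro j hj
      by_cases hjc : j ≤ c
      · rw [List.getD_append _ _ _ _ (by omega)]
        exact ihg j hjc
      · have hj1 : j = c + 1 := by omega
        rw [hj1, List.getD_append_right _ _ _ _ (by omega), ihl]
        have h12 : 1 + c + 1 = c + 1 + 1 := by omega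
        simp [h12]

lemma kmpPi_correct (t : List (Option String)) (ht : 0 < t.length) :
    (kmpPi t).length = t.length ∧ ∀ j, j < t.length → (kmpPi t).getD j 0 = bl t (j+1) := by
  obtain ⟨hl, hg⟩ := kmpPi_fold t ht (t.length - 1) (le_refl _)
  unfold kmpPi
  exact ⟨by omega, fun j hj => hg j (by omega)⟩

lemma bp_le_lc {pw cw : List String} {l : Nat}
    (h : Bp (cw.map some ++ none :: pw.map some) (cw.map some ++ none :: pw.map some).length l) :
    l ≤ cw.length := by
  set t := cw.map some ++ none :: pw.map some with ht
  obtain ⟨hlt, heq⟩ := h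
  rw [List.take_length] at heq
  by_contra hgt
  push_neg at hgt
  have hn : t.length = cw.length + (pw.length + 1) := by simp [ht]
  -- element at index cw.length on both sides
  have h1 : (t.take l)[cw.length]? = t[cw.length]? :=
    List.getElem?_take_of_lt hgt
  have h2 : (t.drop (t.length - l))[cw.length]? = t[(t.length - l) + cw.length]? :=
    List.getElem?_drop
  have hsent : t[cw.length]? = some none := by
    rw [ht, List.getElem?_append_right (by simp)]
    simp
  have hidx : (t.length - l) + cw.length < t.length := by omega
  have hge : cw.length + 1 ≤ (t.length - l) + cw.length := by omega
  have hword : ∃ w, t[(t.length - l) + cw.length]? = some (some w) := by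
    rw [ht, List.getElem?_append_right (by simp only [List.length_map]; omega)]
    simp only [List.length_map]
    rw [show (t.length - l) + cw.length - cw.length = t.length - l from by omega]
    rw [show (t.length - l) = (t.length - l - 1) + 1 from by omega]
    rw [List.getElem?_cons_succ]
    have hlt' : t.length - l - 1 < (pw.map some).length := by simp; omega
    refine ⟨(pw.map some)[t.length - l - 1].getD "", ?_⟩
    rw [List.getElem?_eq_getElem hlt']
    have : ∃ w, (pw.map some)[t.length - l - 1] = some w := by
      simp [List.getElem_map]
    obtain ⟨w, hww⟩ := this
    simp [hww]
  obtain ⟨w, hw⟩ := hword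
  rw [heq, h2, hw] at h1
  rw [hsent] at h1
  simp at h1

lemma bp_le_lp {pw cw : List String} {l : Nat}
    (h : Bp (cw.map some ++ none :: pw.map some) (cw.map some ++ none :: pw.map some).length l) :
    l ≤ pw.length := by
  have hlc := bp_le_lc h
  set t := cw.map some ++ none :: pw.map some with ht
  obtain ⟨hlt, heq⟩ := h
  rw [List.take_length] at heq
  by_contra hgt
  push_neg at hgt
  have hn : t.length = cw.length + (pw.length + 1) := by simp [ht]
  -- sentinel is in the suffix but the prefix is all `some`
  have hmem : (none : Option String) ∈ t.drop (t.length - l) := by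
    have : (t.drop (t.length - l))[cw.length - (t.length - l)]? = t[(t.length - l) + (cw.length - (t.length - l))]? :=
      List.getElem?_drop
    rw [show (t.length - l) + (cw.length - (t.length - l)) = cw.length from by omega] at this
    have hsent : t[cw.length]? = some none := by
      rw [ht, List.getElem?_append_right (by simp)]
      simp
    rw [hsent] at this
    exact List.mem_of_getElem? this
  rw [← heq] at hmem
  have : (none : Option String) ∈ (cw.map some).take l := by
    rwa [ht, List.take_append_of_le_length (by simp; omega)] at hmem
  have := List.mem_of_mem_take this
  simp at this

lemma bp_iff_ov {pw cw : List String} {l : Nat} (hc : l ≤ cw.length) (hp : l ≤ pw.length) :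
    Bp (cw.map some ++ none :: pw.map some) (cw.map some ++ none :: pw.map some).length l ↔
      pw.drop (pw.length - l) = cw.take l := by
  set t := cw.map some ++ none :: pw.map some with ht
  have hn : t.length = cw.length + (pw.length + 1) := by simp [ht]
  have htake : t.take l = (cw.take l).map some := by
    rw [ht, List.take_append_of_le_length (by simp; omega), List.map_take]
  have hdrop : t.drop (t.length - l) = (pw.drop (pw.length - l)).map some := by
    rw [ht, List.drop_append]
    rw [List.drop_eq_nil_of_le (by simp; omega), List.nil_append]
    rw [show t.length - l - (cw.map some).length = (pw.length - l) + 1 from by simp [hn]; omega]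
    rw [List.drop_succ_cons, List.map_drop]
  constructor
  · rintro ⟨hlt, heq⟩
    rw [List.take_length] at heq
    rw [htake, hdrop] at heq
    have := (List.map_inj_right (Option.some_injective String)).mp heq
    exact this.symm
  · intro hov
    refine ⟨by omega, ?_⟩
    rw [List.take_length, htake, hdrop, hov]

lemma loopA_char (prev curr : String) (pw cw : List String) (cap : Int) (r : Nat)
    (hr1 : 0 < r → (pw.drop (pw.length - r) = cw.take r ∧ (r:Int) ≤ cap))
    (hr2 : ∀ l : Nat, 1 ≤ l → l ≤ cw.length → l ≤ pw.length →
      pw.drop (pw.length - l) = cw.take l → r < l → cap < (l:Int)) :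
    ∀ aN : Nat, r ≤ aN → aN ≤ cw.length → aN ≤ pw.length → (aN:Int) ≤ cap →
      mtLoopA prev curr pw cw (PySem.List.pyRange (aN:Int) 0 (-1)) =
        (if 0 < r then pyCat (pyCat prev " ") (PySem.Str.join " " (cw.drop r))
         else pyCat (pyCat prev " ") curr) := by
  intro aN
  induction aN with
  | zero =>
    intro hra _ _ _
    rw [PySem.List.pyRange_neg_one_eq_nil (by norm_num)]
    rw [if_neg (by omega)]
    rfl
  | succ aN ih =>
    intro hra hlc hlp hcap
    rw [PySem.List.pyRange_neg_one_cons (by exact_mod_cast Nat.succ_pos aN)]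
    rw [mtLoopA]
    rw [PySem.List.slice_from_neg_natCast pw (aN+1) (by omega),
        PySem.List.slice_to_natCast cw (aN+1)]
    by_cases hov : pw.drop (pw.length - (aN+1)) = cw.take (aN+1)
    · rw [if_pos hov]
      have hreq : r = aN + 1 := by
        by_contra hne
        have hlt : r < aN + 1 := by omega
        have := hr2 (aN+1) (by omega) hlc hlp hov hlt
        omega
      rw [if_pos (by omega)]
      rw [PySem.List.slice_from_natCast cw (aN+1), hreq]
    · rw [if_neg hov]
      have hne : r ≠ aN + 1 := by
        intro he
        exact hov (he ▸ (hr1 (by omega)).1)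
      have hcast : ((aN+1 : Nat) : Int) - 1 = (aN : Int) := by push_cast; ring
      rw [hcast]
      exact ih (by omega) (by omega) (by omega)
        (by have : ((aN:Int)) < ((aN+1 : Nat) : Int) := by exact_mod_cast Nat.lt_succ_self aN
            omega)

lemma main_eq (prev curr : String) (cap : Int) :
    merge_transcripts prev curr cap = merge_transcripts_alt prev curr cap := by
  show mtLoopA prev curr (PySem.Str.split₀ prev) (PySem.Str.split₀ curr)
      (PySem.List.pyRange (min (min ((PySem.Str.split₀ prev).length : Int) ((PySem.Str.split₀ curr).length : Int)) cap) 0 (-1)) =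
    (if 0 < borderWalk (kmpPi ((PySem.Str.split₀ curr).map some ++ none :: (PySem.Str.split₀ prev).map some))
          (fun l => decide (cap < (l : Int)))
          ((kmpPi ((PySem.Str.split₀ curr).map some ++ none :: (PySem.Str.split₀ prev).map some)).getD
            (((PySem.Str.split₀ curr).map some ++ none :: (PySem.Str.split₀ prev).map some).length - 1) 0 + 1)
          ((kmpPi ((PySem.Str.split₀ curr).map some ++ none :: (PySem.Str.split₀ prev).map some)).getD
            (((PySem.Str.split₀ curr).map some ++ none :: (PySem.Str.split₀ prev).map some).length - 1) 0) then
        pyCat (pyCat prev " ") (PySem.Str.join " "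
          (PySem.List.slice (PySem.Str.split₀ curr)
            (some ((borderWalk (kmpPi ((PySem.Str.split₀ curr).map some ++ none :: (PySem.Str.split₀ prev).map some))
          (fun l => decide (cap < (l : Int)))
          ((kmpPi ((PySem.Str.split₀ curr).map some ++ none :: (PySem.Str.split₀ prev).map some)).getD
            (((PySem.Str.split₀ curr).map some ++ none :: (PySem.Str.split₀ prev).map some).length - 1) 0 + 1)
          ((kmpPi ((PySem.Str.split₀ curr).map some ++ none :: (PySem.Str.split₀ prev).map some)).getD
            (((PySem.Str.split₀ curr).map some ++ none :: (PySem.Str.split₀ prev).map some).length - 1) 0) : Nat) : Int)) none))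
      else pyCat (pyCat prev " ") curr)
  set pw := PySem.Str.split₀ prev with hpw
  set cw := PySem.Str.split₀ curr with hcw
  set t := cw.map some ++ none :: pw.map some with ht
  have hn : t.length = cw.length + (pw.length + 1) := by simp [ht]
  have hn0 : 0 < t.length := by omega
  obtain ⟨hplen, hpg⟩ := kmpPi_correct t hn0
  set pi := kmpPi t with hpidef
  have hl0 : pi.getD (t.length - 1) 0 = bl t t.length := by
    have := hpg (t.length - 1) (by omega)
    rwa [show t.length - 1 + 1 = t.length from by omega] at this
  have hpi' : ∀ k, 1 ≤ k → k < t.length → pi.getD (k-1) 0 = bl t k := by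
    intro k h1 h2
    have := hpg (k-1) (by omega)
    rwa [show k-1+1 = k from by omega] at this
  set cond : Nat → Bool := fun l => decide (cap < (l:Int)) with hcond
  obtain ⟨hBw, hw2, hw3⟩ := borderWalk_spec t pi cond hpi'
    (pi.getD (t.length-1) 0 + 1) (pi.getD (t.length-1) 0) (by omega)
    (by rw [hl0]; exact bp_bl t hn0)
    (by intro l hBl hgt; rw [hl0] at hgt; exact absurd (le_bl hBl) (by omega))
  set r := borderWalk pi cond (pi.getD (t.length-1) 0 + 1) (pi.getD (t.length-1) 0) with hr
  have hBw' : Bp (cw.map some ++ none :: pw.map some) (cw.map some ++ none :: pw.map some).length r := by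
    rw [← ht]; exact hBw
  have hrlc : r ≤ cw.length := bp_le_lc hBw'
  have hrlp : r ≤ pw.length := bp_le_lp hBw'
  have hcapr : 0 < r → (r:Int) ≤ cap := by
    intro h0
    rcases hw2 with hcf | h0'
    · rw [hcond] at hcf; simp only [decide_eq_false_iff_not, not_lt] at hcf; exact hcf
    · omega
  have hr1 : 0 < r → (pw.drop (pw.length - r) = cw.take r ∧ (r:Int) ≤ cap) := by
    intro h0
    exact ⟨(bp_iff_ov hrlc hrlp).mp hBw', hcapr h0⟩
  have hr2 : ∀ l : Nat, 1 ≤ l → l ≤ cw.length → l ≤ pw.length →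
      pw.drop (pw.length - l) = cw.take l → r < l → cap < (l:Int) := by
    intro l h1 h2 h3 hov hlt
    have hB : Bp t t.length l := by rw [ht]; exact (bp_iff_ov h2 h3).mpr hov
    have := hw3 l hB hlt
    rw [hcond] at this
    simpa using this
  set mc : Int := min (min (pw.length : Int) (cw.length : Int)) cap with hmc
  by_cases hmc0 : mc ≤ 0
  · rw [PySem.List.pyRange_neg_one_eq_nil hmc0]
    have hr0 : r = 0 := by
      by_contra h0
      have h1 : (r:Int) ≤ cap := hcapr (by omega)
      have h2 : (r:Int) ≤ mc := by
        rw [hmc]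
        refine le_min (le_min ?_ ?_) h1 <;> exact_mod_cast (by omega)
      omega
    rw [if_neg (by omega)]
    rfl
  · push_neg at hmc0
    have hrle : (0 < r) → (r:Int) ≤ mc := by
      intro h0
      rw [hmc]
      refine le_min (le_min ?_ ?_) (hcapr h0) <;> exact_mod_cast (by omega)
    have htn : ((mc.toNat : Nat) : Int) = mc := Int.toNat_of_nonneg (by omega)
    rw [← htn]
    have := loopA_char prev curr pw cw cap r hr1 hr2 mc.toNat
      (by by_cases h0 : 0 < r
          · have := hrle h0; omega
          · omega)
      (by have : mc ≤ (cw.length : Int) := le_trans (min_le_left _ _) (min_le_right _ _); omega)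
      (by have : mc ≤ (pw.length : Int) := le_trans (min_le_left _ _) (min_le_left _ _); omega)
      (by have : mc ≤ cap := min_le_right _ _; omega)
    rw [this]
    by_cases h0 : 0 < r
    · rw [if_pos h0, if_pos h0, PySem.List.slice_from_natCast]
    · rw [if_neg h0, if_neg h0]

-- ===== VERDICT (by name: the statement is the Claim_ definition above) =====
theorem merge_transcripts_spec : Claim_equal_merge_transcripts := by
  intro prev curr m _
  exact main_eq prev curr m
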